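-- pv_equiv track=rewrite | github.com/MyNguyen1162001/law-rag | src/law_rag/segment.py | slug_doc_id
-- ===== SOURCE A (Python) =====
-- def slug_doc_id(stem: str) -> str:
--     """Build a stable doc_id from filename stem (e.g. '06_2023_TT-NHNN_m_518149' → '06_2023_TT-NHNN')."""
--     parts = stem.split("_")
--     # Keep parts up to the one that contains the agency code (uppercase or hyphen)
--     keep: list[str] = []
--     for p in parts:
--         keep.append(p)
--         if any(c.isupper() for c in p) and "-" in p:
--             break
--     return "_".join(keep) if keep else stem
-- ===== SOURCE B (Python) =====
-- def slug_doc_id(stem: str) -> str: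
--     """Build a stable doc_id from filename stem (e.g. '06_2023_TT-NHNN_m_518149' → '06_2023_TT-NHNN')."""
--     # Single character-level scan: track whether the current '_'-delimited segment
--     # contains an uppercase letter and a hyphen; at each '_' decide whether to cut
--     # the original string there. No split, no list, no join.
--     has_upper = has_hyphen = False
--     for i, c in enumerate(stem):
--         if c == "_":
--             if has_upper and has_hyphen:
--                 return stem[:i]
--             has_upper = has_hyphen = False
--         elif c.isupper():
--             has_upper = True
--         elif c == "-":
--             has_hyphen = True
--     return stem
-- ===== Notes on version B (the rewrite author's own statement) =====
-- stated objective: alternative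
-- what changed: B replaces split/accumulate-list/break/join with a single character-level scan that tracks per-segment has-uppercase and has-hyphen flags and returns a slice of the original string at the deciding underscore (or the whole stem); no part list is ever built.
import Mathlib
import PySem

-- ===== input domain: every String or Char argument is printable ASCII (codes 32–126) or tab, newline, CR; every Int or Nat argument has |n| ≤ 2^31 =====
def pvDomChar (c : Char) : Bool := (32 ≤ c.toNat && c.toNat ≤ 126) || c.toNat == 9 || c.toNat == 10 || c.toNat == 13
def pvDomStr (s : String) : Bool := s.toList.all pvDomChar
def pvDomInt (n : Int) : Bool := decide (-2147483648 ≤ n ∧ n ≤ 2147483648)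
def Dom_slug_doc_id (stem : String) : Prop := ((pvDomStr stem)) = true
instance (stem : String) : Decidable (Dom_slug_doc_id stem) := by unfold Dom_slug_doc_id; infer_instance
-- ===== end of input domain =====

-- B replaces A's split/accumulate/break/join pipeline by a single character-level scan with
-- two per-segment flags that slices the original string at the deciding underscore; same cost.

-- ===== PORT A =====
-- A's for-loop over parts with accumulator `keep` and break
def slugALoop (keep : List (List Char)) : List (List Char) → List (List Char)
  | [] => keep
  | p :: rest =>
      let keep' := keep ++ [p]
      if p.any PySem.Chars.isupper && PySem.Chars.isIn ['-'] p then keep'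
      else slugALoop keep' rest

def slug_doc_id (stem : String) : String :=
  let parts := PySem.Chars.splitOn stem.toList ['_']   -- stem.split("_"), sep "_" ≠ ""
  let keep := slugALoop [] parts
  if !keep.isEmpty then String.ofList (PySem.Chars.join ['_'] keep) else stem

-- ===== PORT B =====
-- B's for-loop over (i, c) in enumerate(stem) with the two segment flags
def slugBLoop (orig : List Char) : List Char → Nat → Bool → Bool → List Char
  | [], _, _, _ => orig
  | c :: rest, i, hu, hh =>
      if c = '_' then
        if hu && hh then orig.take i                   -- stem[:i], 0 ≤ i ≤ len: exact
        else slugBLoop orig rest (i + 1) false false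
      else if PySem.Chars.isupper c then slugBLoop orig rest (i + 1) true hh
      else if c = '-' then slugBLoop orig rest (i + 1) hu true
      else slugBLoop orig rest (i + 1) hu hh

def slug_doc_id_alt (stem : String) : String :=
  String.ofList (slugBLoop stem.toList stem.toList 0 false false)

-- ===== PRECONDITION & SPEC =====
def Spec_slug_doc_id (stem : String) (out : String) : Prop := out = slug_doc_id_alt stem
instance (stem : String) (out : String) : Decidable (Spec_slug_doc_id stem out) := by unfold Spec_slug_doc_id; infer_instance

-- ===== CLAIM (what is proved, stated in full; the proofs are below) =====
def Claim_equal_slug_doc_id : Prop := ∀ (stem : String), Dom_slug_doc_id stem → Spec_slug_doc_id stem (slug_doc_id stem)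

-- ===== LEMMAS AND PROOFS =====

-- first '_'-segment and remaining segments of a char list (pure structural version of split)
def sp1 : List Char → List Char × List (List Char)
  | [] => ([], [])
  | c :: l => if c = '_' then ([], (sp1 l).1 :: (sp1 l).2) else (c :: (sp1 l).1, (sp1 l).2)

-- where B cuts: index (within l) of the deciding '_' given current segment flags
def cut : List Char → Bool → Bool → Option Nat
  | [], _, _ => none
  | c :: rest, hu, hh =>
      if c = '_' then
        if hu && hh then some 0
        else (cut rest false false).map (· + 1)
      else if PySem.Chars.isupper c then (cut rest true hh).map (· + 1)
      else if c = '-' then (cut rest hu true).map (· + 1)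
      else (cut rest hu hh).map (· + 1)

theorem isIn_single (a : Char) (l : List Char) :
    PySem.Chars.isIn [a] l = l.any (· == a) := by
  by_cases h : a ∈ l
  · obtain ⟨s, t, rfl⟩ := List.append_of_mem h
    have h1 : PySem.Chars.isIn [a] (s ++ a :: t) = true := by
      rw [PySem.Chars.isIn_iff_infix]
      exact ⟨s, t, by simp⟩
    rw [h1]
    symm
    rw [List.any_eq_true]
    exact ⟨a, by simp, by simp⟩
  · have h1 : PySem.Chars.isIn [a] l = false := by
      rw [PySem.Chars.isIn_eq_false_iff]
      intro hinf
      exact h (hinf.subset (List.mem_singleton_self a))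
    rw [h1]
    symm
    rw [List.any_eq_false]
    intro x hx
    simp only [beq_iff_eq]
    intro hxa
    exact h (hxa ▸ hx)

theorem go_eq (l : List Char) :
    ∀ (fuel : Nat), l.length ≤ fuel → ∀ (cur : List Char) (acc : List (List Char)),
      PySem.Chars.splitOn.go ['_'] fuel l cur acc
        = acc.reverse ++ (cur.reverse ++ (sp1 l).1) :: (sp1 l).2 := by
  induction l with
  | nil =>
      intro fuel _ cur acc
      cases fuel <;> simp [PySem.Chars.splitOn.go, sp1]
  | cons c rest ih =>
      intro fuel hf cur acc
      cases fuel with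
      | zero => simp at hf
      | succ n =>
          have hn : rest.length ≤ n := by simpa using hf
          by_cases hc : c = '_'
          · subst hc
            simp only [PySem.Chars.splitOn.go, List.isPrefixOf, BEq.rfl, Bool.true_and,
              if_true]
            rw [show List.drop ['_'].length ('_' :: rest) = rest from by simp]
            rw [ih n hn [] (cur.reverse :: acc)]
            simp [sp1]
          · simp only [PySem.Chars.splitOn.go, List.isPrefixOf]
            have hbeq : ('_' == c) = false := by simp [Ne.symm hc]
            simp only [hbeq, Bool.false_and, Bool.false_eq_true, if_false]
            rw [ih n hn (c :: cur) acc]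
            simp [sp1, hc]

theorem splitOn_eq_sp1 (l : List Char) :
    PySem.Chars.splitOn l ['_'] = (sp1 l).1 :: (sp1 l).2 := by
  unfold PySem.Chars.splitOn
  rw [go_eq l (l.length + 1) (by omega) [] []]
  simp

-- the accumulator peels off
theorem slugALoop_append (ps : List (List Char)) :
    ∀ keep, slugALoop keep ps = keep ++ slugALoop [] ps := by
  induction ps with
  | nil => intro keep; simp [slugALoop]
  | cons p rest ih =>
      intro keep
      simp only [slugALoop, List.nil_append]
      by_cases hp : (p.any PySem.Chars.isupper && PySem.Chars.isIn ['-'] p) = true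
      · simp [hp]
      · simp only [Bool.not_eq_true] at hp
        simp only [hp, Bool.false_eq_true, if_false]
        rw [ih (keep ++ [p]), ih [p]]
        simp

theorem slugALoop_cons (p : List Char) (ps : List (List Char)) :
    slugALoop [] (p :: ps)
      = if p.any PySem.Chars.isupper && PySem.Chars.isIn ['-'] p then [p]
        else p :: slugALoop [] ps := by
  simp only [slugALoop]
  split
  · simp
  · rw [slugALoop_append]; simp

-- A's pipeline on the segments of l, with the first segment already extended by cur,
-- equals B's cut applied to l with cur's flags.
theorem A_main (l : List Char) :
    ∀ (cur : List Char),
      PySem.Chars.join ['_'] (slugALoop [] ((cur ++ (sp1 l).1) :: (sp1 l).2))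
        = match cut l (cur.any PySem.Chars.isupper) (cur.any (· == '-')) with
          | some j => cur ++ l.take j
          | none => cur ++ l := by
  induction l with
  | nil =>
      intro cur
      simp only [sp1, List.append_nil, cut]
      rw [slugALoop_cons]
      split <;> simp [PySem.Chars.join, List.intercalate, slugALoop]
  | cons c rest ih =>
      intro cur
      by_cases hc : c = '_'
      · subst hc
        simp only [sp1, if_true, List.append_nil, cut]
        rw [slugALoop_cons]
        by_cases hp : (cur.any PySem.Chars.isupper && PySem.Chars.isIn ['-'] cur) = true
        · have hp' : (cur.any PySem.Chars.isupper && cur.any (· == '-')) = true := by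
            rwa [isIn_single] at hp
          simp [hp, hp', PySem.Chars.join, List.intercalate]
        · have hp' : (cur.any PySem.Chars.isupper && cur.any (· == '-')) = false := by
            rw [← isIn_single]; simpa using hp
          simp only [Bool.not_eq_true] at hp
          simp only [hp, Bool.false_eq_true, if_false, hp']
          have ihr := ih []
          simp only [List.nil_append, List.any_nil] at ihr
          have hA : slugALoop [] (((sp1 rest).1) :: (sp1 rest).2) ≠ [] := by
            rw [slugALoop_cons]; split <;> simp
          obtain ⟨q, qs, hqqs⟩ := List.exists_cons_of_ne_nil hA
          rw [hqqs]
          rw [PySem.Chars.join_cons_cons]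
          rw [← hqqs, ihr]
          cases hcut : cut rest false false with
          | none => simp
          | some j => simp [List.take_succ_cons]
      · have hsp : sp1 (c :: rest) = (c :: (sp1 rest).1, (sp1 rest).2) := by
          simp [sp1, hc]
        rw [hsp]
        have hflag_u : (cur ++ [c]).any PySem.Chars.isupper
            = (cur.any PySem.Chars.isupper || PySem.Chars.isupper c) := by simp
        have hflag_h : (cur ++ [c]).any (· == '-') = (cur.any (· == '-') || (c == '-')) := by simp
        have ihc := ih (cur ++ [c])
        rw [List.append_assoc] at ihc
        simp only [List.singleton_append] at ihc
        rw [ihc, hflag_u, hflag_h]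
        simp only [cut, hc, if_false]
        by_cases hu : PySem.Chars.isupper c = true
        · have hch : (c == '-') = false := by
            by_contra h
            simp only [Bool.not_eq_false, beq_iff_eq] at h
            subst h
            simp [PySem.Chars.isupper] at hu
          simp only [hu, if_true, hch, Bool.or_false, Bool.or_true]
          cases hcut : cut rest true (cur.any (· == '-')) with
          | none => simp
          | some j => simp [List.take_succ_cons]
        · simp only [Bool.not_eq_true] at hu
          simp only [hu, Bool.false_eq_true, if_false, Bool.or_false]
          by_cases hch : c = '-'
          · subst hch
            simp only [BEq.rfl, if_true, Bool.or_true]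
            cases hcut : cut rest (cur.any PySem.Chars.isupper) true with
            | none => simp
            | some j => simp [List.take_succ_cons]
          · have hch' : (c == '-') = false := by simp [hch]
            simp only [hch, if_false, hch', Bool.or_false]
            cases hcut : cut rest (cur.any PySem.Chars.isupper) (cur.any (· == '-')) with
            | none => simp
            | some j => simp [List.take_succ_cons]

-- B's loop computes the same cut, slicing the original
theorem B_main (l : List Char) :
    ∀ (orig : List Char) (i : Nat) (hu hh : Bool),
      slugBLoop orig l i hu hh
        = match cut l hu hh with
          | some j => orig.take (i + j)
          | none => orig := by
  induction l with
  | nil => intro orig i hu hh; simp [slugBLoop, cut]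
  | cons c rest ih =>
      intro orig i hu hh
      simp only [slugBLoop, cut]
      by_cases hc : c = '_'
      · simp only [hc, if_true]
        by_cases hf : (hu && hh) = true
        · simp [hf]
        · simp only [Bool.not_eq_true] at hf
          simp only [hf, Bool.false_eq_true, if_false]
          rw [ih]
          cases hcut : cut rest false false with
          | none => simp
          | some j => simp only [Option.map_some]
                      have : i + (j + 1) = i + 1 + j := by omega
                      simp [this]
      · simp only [hc, if_false]
        by_cases hu' : PySem.Chars.isupper c = true
        · simp only [hu', if_true]
          rw [ih]
          cases hcut : cut rest true hh with
          | none => simp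
          | some j => simp only [Option.map_some]
                      have : i + (j + 1) = i + 1 + j := by omega
                      simp [this]
        · simp only [Bool.not_eq_true] at hu'
          simp only [hu', Bool.false_eq_true, if_false]
          by_cases hch : c = '-'
          · simp only [hch, if_true]
            rw [ih]
            cases hcut : cut rest hu true with
            | none => simp
            | some j => simp only [Option.map_some]
                        have : i + (j + 1) = i + 1 + j := by omega
                        simp [this]
          · simp only [hch, if_false]
            rw [ih]
            cases hcut : cut rest hu hh with
            | none => simp
            | some j => simp only [Option.map_some]
                        have : i + (j + 1) = i + 1 + j := by omega
                        simp [this]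

-- ===== VERDICT (by name: the statement is the Claim_ definition above) =====
theorem slug_doc_id_spec : Claim_equal_slug_doc_id := by
  intro stem _
  unfold Spec_slug_doc_id slug_doc_id slug_doc_id_alt
  simp only [splitOn_eq_sp1]
  have hkeep : slugALoop [] ((sp1 stem.toList).1 :: (sp1 stem.toList).2) ≠ [] := by
    rw [slugALoop_cons]; split <;> simp
  rw [if_pos (by simpa using hkeep)]
  have hA := A_main stem.toList []
  simp only [List.nil_append, List.any_nil] at hA
  rw [hA, B_main]
  cases hcut : cut stem.toList false false with
  | none => simp
  | some j => simp
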